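-- pv_equiv track=rewrite | github.com/GranusClarvis/clarvis | clarvis/brain/search.py | _deprioritize_bridges
-- ===== SOURCE A (Python) =====
-- _BRIDGE_ID_PREFIXES = ("bridge_", "sbridge_", "cross_link_", "xlink_", "boost_", "tm_")
--
-- _BRIDGE_TEXT_PREFIXES = (
--     "BRIDGE [", "Connection between", "Phi action:", "Phi integration",
--     "Cross-domain link:", "Cross-domain insight:", "Semantic bridge between",
-- )
--
-- def _is_bridge_memory(result: dict) -> bool:
--     """Check if a recall result is a synthetic bridge/boost memory."""
--     mem_id = result.get("id", "")
--     if any(mem_id.startswith(p) for p in _BRIDGE_ID_PREFIXES):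
--         return True
--     doc = result.get("document", "")
--     if any(doc.startswith(p) for p in _BRIDGE_TEXT_PREFIXES):
--         return True
--     return False
--
-- def _deprioritize_bridges(results: list) -> list:
--     """Move bridge memories to end of results (don't remove — may still be useful)."""
--     organic = []
--     bridges = []
--     for r in results:
--         if _is_bridge_memory(r):
--             bridges.append(r)
--         else:
--             organic.append(r)
--     return organic + bridges
-- ===== SOURCE B (Python) =====
-- _BRIDGE_ID_PREFIXES = ("bridge_", "sbridge_", "cross_link_", "xlink_", "boost_", "tm_")
--
-- _BRIDGE_TEXT_PREFIXES = (
--     "BRIDGE [", "Connection between", "Phi action:", "Phi integration",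
--     "Cross-domain link:", "Cross-domain insight:", "Semantic bridge between",
-- )
--
-- def _starts_with_any(s, prefixes):
--     for p in prefixes:
--         if s.startswith(p):
--             return True
--     return False
--
-- def _bridge_rank(result):
--     """True iff the result is a synthetic bridge/boost memory (sorts after organic)."""
--     return (_starts_with_any(result.get("id", ""), _BRIDGE_ID_PREFIXES)
--             or _starts_with_any(result.get("document", ""), _BRIDGE_TEXT_PREFIXES))
--
-- def _deprioritize_bridges(results: list) -> list:
--     """Move bridge memories to end: one stable sort on the bridge flag (False < True)."""
--     return sorted(results, key=_bridge_rank)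
-- ===== Notes on version B (the rewrite author's own statement) =====
-- stated objective: idiomatic
-- what changed: Replaced the explicit two-accumulator partition loop with a single stable sort keyed by the bridge flag (stability keeps each group's original relative order), and the prefix test itself is an explicit short-circuit loop over the prefix tuple instead of any() over a generator.
import Mathlib
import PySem

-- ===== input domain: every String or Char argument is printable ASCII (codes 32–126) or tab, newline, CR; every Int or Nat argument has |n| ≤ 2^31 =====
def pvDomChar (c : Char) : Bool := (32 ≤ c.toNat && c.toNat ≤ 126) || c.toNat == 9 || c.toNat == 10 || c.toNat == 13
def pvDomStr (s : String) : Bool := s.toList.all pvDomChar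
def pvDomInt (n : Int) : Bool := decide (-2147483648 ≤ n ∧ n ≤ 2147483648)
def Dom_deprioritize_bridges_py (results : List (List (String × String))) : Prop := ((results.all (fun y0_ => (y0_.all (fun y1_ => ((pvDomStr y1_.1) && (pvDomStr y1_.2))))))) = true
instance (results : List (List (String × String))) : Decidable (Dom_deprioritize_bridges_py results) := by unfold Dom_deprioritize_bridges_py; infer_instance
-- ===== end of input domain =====

-- B replaces A's explicit two-list partition loop with one stable sort on a bridge flag whose
-- prefix test is an explicit short-circuit loop (more idiomatic; same result).

-- ===== PORT A =====
-- module constants shared by both Pythons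
def pvBridgeIdPrefixes : List String := ["bridge_", "sbridge_", "cross_link_", "xlink_", "boost_", "tm_"]

def pvBridgeTextPrefixes : List String :=
  ["BRIDGE [", "Connection between", "Phi action:", "Phi integration",
   "Cross-domain link:", "Cross-domain insight:", "Semantic bridge between"]

-- A's helper _is_bridge_memory: any() over a generator, early-return branches
def pvIsBridgeMemory (r : List (String × String)) : Bool :=
  let memId := (PySem.Dict.mk r).getD "id" ""
  if pvBridgeIdPrefixes.any (fun p => PySem.Str.startswith memId p) then true
  else
    let doc := (PySem.Dict.mk r).getD "document" ""
    if pvBridgeTextPrefixes.any (fun p => PySem.Str.startswith doc p) then true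
    else false

def deprioritize_bridges_py (results : List (List (String × String))) : List (List (String × String)) :=
  let p := results.foldl
    (fun (acc : List (List (String × String)) × List (List (String × String))) r =>
      if pvIsBridgeMemory r then (acc.1, acc.2 ++ [r]) else (acc.1 ++ [r], acc.2))
    ([], [])
  p.1 ++ p.2

-- ===== PORT B =====
-- B's helper _starts_with_any: explicit loop over the prefixes with an early return
def pvStartsWithAny (s : String) : List String → Bool
  | [] => false
  | p :: ps => if PySem.Str.startswith s p then true else pvStartsWithAny s ps

-- B's key _bridge_rank (a Python bool; bools order as False < True)
def pvBridgeRank (r : List (String × String)) : Bool :=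
  pvStartsWithAny ((PySem.Dict.mk r).getD "id" "") pvBridgeIdPrefixes
    || pvStartsWithAny ((PySem.Dict.mk r).getD "document" "") pvBridgeTextPrefixes

def deprioritize_bridges_py_alt (results : List (List (String × String))) : List (List (String × String)) :=
  PySem.List.sorted results pvBridgeRank false

-- ===== PRECONDITION & SPEC =====
def Spec_deprioritize_bridges_py (results : List (List (String × String))) (out : List (List (String × String))) : Prop := out = deprioritize_bridges_py_alt results
instance (results : List (List (String × String))) (out : List (List (String × String))) : Decidable (Spec_deprioritize_bridges_py results out) := by unfold Spec_deprioritize_bridges_py; infer_instance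

-- ===== CLAIM (what is proved, stated in full; the proofs are below) =====
def Claim_equal_deprioritize_bridges_py : Prop := ∀ (results : List (List (String × String))), Dom_deprioritize_bridges_py results → Spec_deprioritize_bridges_py results (deprioritize_bridges_py results)

-- ===== LEMMAS AND PROOFS =====

-- B's loop-based prefix test computes the same flag as A's any()
lemma startsWithAny_eq_any (s : String) (ps : List String) :
    pvStartsWithAny s ps = ps.any (fun p => PySem.Str.startswith s p) := by
  induction ps with
  | nil => rfl
  | cons p ps ih =>
    cases h : PySem.Str.startswith s p <;> simp [pvStartsWithAny, h, ih]

lemma bif_or (a b : Bool) : (if a then true else if b then true else false) = (a || b) := by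
  cases a <;> cases b <;> simp

lemma rank_eq_isBridge (r : List (String × String)) :
    pvBridgeRank r = pvIsBridgeMemory r := by
  simp only [pvBridgeRank, pvIsBridgeMemory, startsWithAny_eq_any, bif_or]

-- the comparison function of B's stable sort
def pvBefore (a b : List (String × String)) : Bool :=
  decide (pvBridgeRank a < pvBridgeRank b)

lemma pvBefore_eq (a b : List (String × String)) :
    pvBefore a b = (!pvIsBridgeMemory a && pvIsBridgeMemory b) := by
  unfold pvBefore
  rw [← rank_eq_isBridge a, ← rank_eq_isBridge b]
  cases pvBridgeRank a <;> cases pvBridgeRank b <;> decide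

-- inserting a non-bridge element into organic ++ bridges lands between them
lemma insertBy_nonbridge (x : List (String × String)) (hx : pvIsBridgeMemory x = false)
    (O B : List (List (String × String)))
    (hO : ∀ a ∈ O, pvIsBridgeMemory a = false)
    (hB : ∀ b ∈ B, pvIsBridgeMemory b = true) :
    PySem.List.insertBy pvBefore x (O ++ B) = O ++ x :: B := by
  induction O with
  | nil =>
    cases B with
    | nil => simp [PySem.List.insertBy]
    | cons b bs =>
      have hb : pvIsBridgeMemory b = true := hB b (by simp)
      simp [PySem.List.insertBy, pvBefore_eq, hx, hb]
  | cons o os ih =>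
    have ho : pvIsBridgeMemory o = false := hO o (by simp)
    have ih' := ih (fun a ha => hO a (by simp [ha]))
    simp [PySem.List.insertBy, pvBefore_eq, ho, ih']

-- inserting a bridge element appends at the very end
lemma insertBy_bridge (x : List (String × String)) (hx : pvIsBridgeMemory x = true)
    (L : List (List (String × String))) :
    PySem.List.insertBy pvBefore x L = L ++ [x] := by
  induction L with
  | nil => simp [PySem.List.insertBy]
  | cons y ys ih => simp [PySem.List.insertBy, pvBefore_eq, hx, ih]

-- invariant of B's insertion-sort fold
lemma sort_fold_partition (xs : List (List (String × String))) :
    ∀ (O B : List (List (String × String))),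
      (∀ a ∈ O, pvIsBridgeMemory a = false) →
      (∀ b ∈ B, pvIsBridgeMemory b = true) →
      xs.foldl (fun acc x => PySem.List.insertBy pvBefore x acc) (O ++ B) =
        (O ++ xs.filter (fun r => !pvIsBridgeMemory r)) ++ (B ++ xs.filter pvIsBridgeMemory) := by
  induction xs with
  | nil => intro O B _ _; simp
  | cons x xs ih =>
    intro O B hO hB
    cases hx : pvIsBridgeMemory x with
    | true =>
      have h1 : PySem.List.insertBy pvBefore x (O ++ B) = O ++ (B ++ [x]) := by
        rw [insertBy_bridge x hx]; simp
      have hB' : ∀ b ∈ B ++ [x], pvIsBridgeMemory b = true := by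
        intro b hb; rcases List.mem_append.1 hb with h | h
        · exact hB b h
        · simp at h; subst h; exact hx
      simp only [List.foldl_cons, h1, ih O (B ++ [x]) hO hB', List.filter_cons, hx]
      simp
    | false =>
      have h1 : PySem.List.insertBy pvBefore x (O ++ B) = (O ++ [x]) ++ B := by
        rw [insertBy_nonbridge x hx O B hO hB]; simp
      have hO' : ∀ a ∈ O ++ [x], pvIsBridgeMemory a = false := by
        intro a ha; rcases List.mem_append.1 ha with h | h
        · exact hO a h
        · simp at h; subst h; exact hx
      simp only [List.foldl_cons, h1, ih (O ++ [x]) B hO' hB, List.filter_cons, hx]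
      simp

-- invariant of A's partition fold
lemma partition_fold (xs : List (List (String × String))) :
    ∀ (o b : List (List (String × String))),
      xs.foldl
        (fun (acc : List (List (String × String)) × List (List (String × String))) r =>
          if pvIsBridgeMemory r then (acc.1, acc.2 ++ [r]) else (acc.1 ++ [r], acc.2))
        (o, b) =
        (o ++ xs.filter (fun r => !pvIsBridgeMemory r), b ++ xs.filter pvIsBridgeMemory) := by
  induction xs with
  | nil => intro o b; simp
  | cons x xs ih =>
    intro o b
    cases hx : pvIsBridgeMemory x with
    | true => simp [hx, ih]
    | false => simp [hx, ih]

-- ===== VERDICT (by name: the statement is the Claim_ definition above) =====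
theorem deprioritize_bridges_py_spec : Claim_equal_deprioritize_bridges_py := by
  intro results _
  unfold Spec_deprioritize_bridges_py deprioritize_bridges_py deprioritize_bridges_py_alt
  rw [partition_fold results [] []]
  have hsorted : PySem.List.sorted results pvBridgeRank false =
      results.foldl (fun acc x => PySem.List.insertBy pvBefore x acc) [] :=
    PySem.List.sorted_eq_foldl_insertBy results pvBridgeRank
  rw [hsorted]
  have := sort_fold_partition results [] [] (by simp) (by simp)
  simp only [List.nil_append] at this ⊢
  exact this.symm ▸ rfl
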